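-- pv_equiv track=rewrite | github.com/edgarjs/claudio | lib/memory.py | should_consolidate
-- ===== SOURCE A (Python) =====
-- MIN_TURNS_FOR_CONSOLIDATION = 3
--
-- MIN_WORDS_FOR_CONSOLIDATION = 20
--
-- def should_consolidate(messages: list[dict]) -> bool:
--     """Gating: decide whether a conversation is worth consolidating."""
--     if len(messages) < MIN_TURNS_FOR_CONSOLIDATION:
--         return False
--
--     # Check if all user messages are trivially short
--     user_messages = [m["content"] for m in messages if m["role"] == "user"]
--     if all(len(msg.split()) < MIN_WORDS_FOR_CONSOLIDATION for msg in user_messages):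
--         # Exception: slash commands only → skip
--         if all(msg.strip().startswith("/") for msg in user_messages):
--             return False
--         # Short but potentially high-signal — let LLM decide
--         return True
--
--     return True
-- ===== SOURCE B (Python) =====
-- MIN_TURNS_FOR_CONSOLIDATION = 3
--
-- MIN_WORDS_FOR_CONSOLIDATION = 20
--
-- def _any_high_signal(msgs: list) -> bool:
--     """Recursively search for one user message worth keeping: long, or not a slash command."""
--     if not msgs:
--         return False
--     m = msgs[0]
--     if m["role"] == "user":
--         content = m["content"]
--         if (len(content.split()) >= MIN_WORDS_FOR_CONSOLIDATION
--                 or not content.strip().startswith("/")):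
--             return True
--     return _any_high_signal(msgs[1:])
--
-- def should_consolidate(messages: list[dict]) -> bool:
--     """Gating: decide whether a conversation is worth consolidating."""
--     if len(messages) < MIN_TURNS_FOR_CONSOLIDATION:
--         return False
--     return _any_high_signal(messages)
-- ===== Notes on version B (the rewrite author's own statement) =====
-- stated objective: alternative
-- what changed: De Morgan's dual: instead of extracting all user messages and testing two universal all() conditions, B recursively searches for one witness user message that is high-signal (>=20 words or not a slash command), returning True at the first hit and False if the search exhausts the list.
import Mathlib
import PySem

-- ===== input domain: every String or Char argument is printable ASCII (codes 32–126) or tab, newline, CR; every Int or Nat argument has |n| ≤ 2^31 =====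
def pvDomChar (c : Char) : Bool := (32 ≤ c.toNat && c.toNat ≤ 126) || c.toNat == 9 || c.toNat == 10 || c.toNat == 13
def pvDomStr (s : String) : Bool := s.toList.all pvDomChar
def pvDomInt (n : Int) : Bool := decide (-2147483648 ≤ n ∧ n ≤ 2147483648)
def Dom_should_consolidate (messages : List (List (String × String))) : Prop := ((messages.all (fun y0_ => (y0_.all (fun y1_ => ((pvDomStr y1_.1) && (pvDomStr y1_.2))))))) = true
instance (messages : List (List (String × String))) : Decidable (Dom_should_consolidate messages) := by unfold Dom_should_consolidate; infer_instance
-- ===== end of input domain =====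

-- B is the De Morgan dual of A: a recursive early-exit search for one high-signal user
-- message instead of A's extracted user-message list and two universal all() scans
-- (alternative decomposition; return value only).

-- ===== PORT A =====
def should_consolidate (messages : List (List (String × String))) : Bool :=
  if messages.length < 3 then false
  else
    -- user_messages = [m["content"] for m in messages if m["role"] == "user"]
    let user_messages :=
      (messages.filter (fun m => PySem.Dict.get? (PySem.Dict.mk m) "role" == some "user")).map
        (fun m => (PySem.Dict.get? (PySem.Dict.mk m) "content").getD "")
    if user_messages.all (fun msg => (PySem.Str.split₀ msg).length < 20) then
      if user_messages.all (fun msg => PySem.Str.startswith (PySem.Str.strip msg) "/") then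
        false
      else
        true
    else
      true

-- ===== PORT B =====
-- _any_high_signal: recursion on the message list, True at the first high-signal user message
def anyHighSignal : List (List (String × String)) → Bool
  | [] => false
  | m :: rest =>
    if PySem.Dict.get? (PySem.Dict.mk m) "role" == some "user" then
      let content := (PySem.Dict.get? (PySem.Dict.mk m) "content").getD ""
      if decide ((PySem.Str.split₀ content).length ≥ 20)
          || !(PySem.Str.startswith (PySem.Str.strip content) "/") then true
      else anyHighSignal rest
    else anyHighSignal rest

def should_consolidate_alt (messages : List (List (String × String))) : Bool :=
  if messages.length < 3 then false
  else anyHighSignal messages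

-- ===== PRECONDITION & SPEC =====
-- Pre_ excludes exactly the inputs where Python A raises KeyError: with length ≥ 3, a
-- message missing the "role" key, or a user message missing the "content" key.
def Pre_should_consolidate (messages : List (List (String × String))) : Prop :=
  messages.length < 3 ∨
    ∀ m ∈ messages, (PySem.Dict.get? (PySem.Dict.mk m) "role").isSome ∧
      (PySem.Dict.get? (PySem.Dict.mk m) "role" = some "user" → (PySem.Dict.get? (PySem.Dict.mk m) "content").isSome)
instance (messages : List (List (String × String))) : Decidable (Pre_should_consolidate messages) := by unfold Pre_should_consolidate; infer_instance

def pvWitness_should_consolidate : (List (List (String × String))) :=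
  [[("role", "user"), ("content", "/help me")],
   [("role", "assistant"), ("content", "sure")],
   [("role", "user"), ("content", "thanks a lot")]]

def Spec_should_consolidate (messages : List (List (String × String))) (out : Bool) : Prop := out = should_consolidate_alt messages
instance (messages : List (List (String × String))) (out : Bool) : Decidable (Spec_should_consolidate messages out) := by unfold Spec_should_consolidate; infer_instance

-- ===== CLAIM (what is proved, stated in full; the proofs are below) =====
def Claim_equal_should_consolidate : Prop := ∀ (messages : List (List (String × String))), Dom_should_consolidate messages → Pre_should_consolidate messages → Spec_should_consolidate messages (should_consolidate messages)

-- ===== LEMMAS AND PROOFS =====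

-- B's witness search is the negation of A's two universal scans over the user messages.
theorem anyHighSignal_eq (messages : List (List (String × String))) :
    anyHighSignal messages
      = !(((messages.filter (fun m => PySem.Dict.get? (PySem.Dict.mk m) "role" == some "user")).map
            (fun m => (PySem.Dict.get? (PySem.Dict.mk m) "content").getD "")).all
            (fun msg => (PySem.Str.split₀ msg).length < 20)
          && ((messages.filter (fun m => PySem.Dict.get? (PySem.Dict.mk m) "role" == some "user")).map
            (fun m => (PySem.Dict.get? (PySem.Dict.mk m) "content").getD "")).all
            (fun msg => PySem.Str.startswith (PySem.Str.strip msg) "/")) := by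
  induction messages with
  | nil => simp [anyHighSignal]
  | cons m rest ih =>
    by_cases h : PySem.Dict.get? (PySem.Dict.mk m) "role" == some "user"
    · simp only [anyHighSignal, h, if_pos, List.filter_cons, List.map_cons, List.all_cons]
      set c := (PySem.Dict.get? (PySem.Dict.mk m) "content").getD ""
      by_cases hlong : (PySem.Str.split₀ c).length ≥ 20
      · simp [hlong, Nat.not_lt_of_le hlong]
      · by_cases hsl : PySem.Str.startswith (PySem.Str.strip c) "/"
        · simp [PySem.Str.startswith, PySem.Str.strip] at hsl
          simp [hlong, hsl, ih, Nat.lt_of_not_le hlong]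
        · simp [PySem.Str.startswith, PySem.Str.strip] at hsl
          simp [hlong, hsl]
    · simp only [anyHighSignal, h, Bool.false_eq_true, if_false, List.filter_cons]
      simp only [Bool.false_eq_true] at h
      simp [h, ih]

-- ===== VERDICT (by name: the statement is the Claim_ definition above) =====
theorem should_consolidate_spec : Claim_equal_should_consolidate := by
  intro messages _ _
  unfold Spec_should_consolidate should_consolidate should_consolidate_alt
  by_cases hlen : messages.length < 3
  · simp [hlen]
  · simp only [hlen, if_false]
    rw [anyHighSignal_eq]
    set um := (messages.filter (fun m => PySem.Dict.get? (PySem.Dict.mk m) "role" == some "user")).map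
              (fun m => (PySem.Dict.get? (PySem.Dict.mk m) "content").getD "")
    cases h1 : um.all (fun msg => decide ((PySem.Str.split₀ msg).length < 20)) <;>
      cases h2 : um.all (fun msg => PySem.Str.startswith (PySem.Str.strip msg) "/") <;>
      simp [h1, h2]
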